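-- pv_equiv track=rewrite | github.com/AfterHell/CSE307 | HW2/sumdoku.py | checkGreater
-- ===== SOURCE A (Python) =====
-- valid_masks = [0, 0x01, 0x02, 0x04, 0x08, 0x10, 0x20, 0x40, 0x80, 0x100]
--
-- def checkGreater(baseMask, chkMask):
-- 	result = 0
-- 	i = 0
-- 	if(valid_masks[1] & baseMask):
-- 		result |= valid_masks[1]
--
-- 	for i in range(9, 2, -1):
-- 		if((valid_masks[i] & chkMask) != 0):
-- 			break
-- 		elif(valid_masks[11-i] & baseMask):
-- 			result |= valid_masks[11-i]
--
-- 	return result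
-- ===== SOURCE B (Python) =====
-- valid_masks = [0, 0x01, 0x02, 0x04, 0x08, 0x10, 0x20, 0x40, 0x80, 0x100]
--
-- def checkGreater(baseMask, chkMask):
--     # closed form: keep the low bits of baseMask below the highest chk bit in 3..9
--     masked = chkMask & 0x1FC
--     cutoff = 10 - max(masked.bit_length(), 2)
--     return baseMask & ((1 << cutoff) - 1)
-- ===== Notes on version B (the rewrite author's own statement) =====
-- stated objective: simpler
-- what changed: Replaced A's break-on-first-set-bit loop over valid_masks with a closed form: mask chkMask to bits 2..8, take its bit_length to get the cutoff, and return baseMask AND-ed with the induced low-bit mask.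
import Mathlib
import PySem

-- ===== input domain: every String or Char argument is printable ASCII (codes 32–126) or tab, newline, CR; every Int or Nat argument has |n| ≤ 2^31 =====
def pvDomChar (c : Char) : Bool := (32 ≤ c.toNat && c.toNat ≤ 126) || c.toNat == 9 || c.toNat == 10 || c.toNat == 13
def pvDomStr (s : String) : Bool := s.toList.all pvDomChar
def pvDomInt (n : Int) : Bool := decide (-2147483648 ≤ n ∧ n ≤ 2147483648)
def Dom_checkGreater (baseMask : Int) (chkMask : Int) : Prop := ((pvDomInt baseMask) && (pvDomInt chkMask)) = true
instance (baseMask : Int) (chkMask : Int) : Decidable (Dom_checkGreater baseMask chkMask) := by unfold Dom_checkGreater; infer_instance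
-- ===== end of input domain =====

-- B replaces A's break-on-first-chk-bit loop by a closed form: mask chkMask to bits 2..8,
-- take its bit_length, and AND baseMask with the induced low-bit mask (objective: simpler).

-- ===== PORT A =====
def validMasks : List Int := [0, 0x01, 0x02, 0x04, 0x08, 0x10, 0x20, 0x40, 0x80, 0x100]

-- the `for i in range(9, 2, -1)` loop with its `break` (returning the accumulator) and
-- `elif` or-accumulation, step for step
def cgLoop (baseMask chkMask : Int) : List Int → Int → Int
  | [], result => result
  | i :: rest, result =>
    if PySem.Int.band (PySem.List.pyGetD validMasks i 0) chkMask ≠ 0 then result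
    else if PySem.Int.band (PySem.List.pyGetD validMasks (11 - i) 0) baseMask ≠ 0 then
      cgLoop baseMask chkMask rest (PySem.Int.bor result (PySem.List.pyGetD validMasks (11 - i) 0))
    else cgLoop baseMask chkMask rest result

def checkGreater (baseMask : Int) (chkMask : Int) : Int :=
  let result : Int := 0
  let result := if PySem.Int.band (PySem.List.pyGetD validMasks 1 0) baseMask ≠ 0
                then PySem.Int.bor result (PySem.List.pyGetD validMasks 1 0) else result
  cgLoop baseMask chkMask (PySem.List.pyRange 9 2 (-1)) result

-- ===== PORT B =====
def checkGreater_alt (baseMask : Int) (chkMask : Int) : Int :=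
  let masked := PySem.Int.band chkMask 0x1FC
  let cutoff : Nat := 10 - max (PySem.Int.bitLength masked) 2
  PySem.Int.band baseMask (((1 : Int) <<< cutoff) - 1)

-- ===== PRECONDITION & SPEC =====
def Spec_checkGreater (baseMask : Int) (chkMask : Int) (out : Int) : Prop := out = checkGreater_alt baseMask chkMask
instance (baseMask : Int) (chkMask : Int) (out : Int) : Decidable (Spec_checkGreater baseMask chkMask out) := by unfold Spec_checkGreater; infer_instance

-- ===== CLAIM (what is proved, stated in full; the proofs are below) =====
def Claim_equal_checkGreater : Prop := ∀ (baseMask : Int) (chkMask : Int), Dom_checkGreater baseMask chkMask → Spec_checkGreater baseMask chkMask (checkGreater baseMask chkMask)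

-- ===== LEMMAS AND PROOFS =====

-- binary recurrence of Nat.&&&
theorem pv_and_rec (a b : Nat) : a &&& b = 2 * ((a / 2) &&& (b / 2)) + (a % 2) * (b % 2) := by
  have hd := @Nat.and_div_two a b
  have h1 := Nat.testBit_and a b 0
  simp only [Nat.testBit_zero] at h1
  have h2 : ((a &&& b) % 2 = 1) ↔ ((a % 2 = 1) ∧ (b % 2 = 1)) := by
    constructor
    · intro h
      rw [h] at h1
      exact ⟨of_decide_eq_true (Bool.and_eq_true _ _ |>.mp h1.symm).1,
             of_decide_eq_true (Bool.and_eq_true _ _ |>.mp h1.symm).2⟩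
    · rintro ⟨h2, h3⟩
      rw [h2, h3] at h1
      simpa using h1
  rcases Nat.mod_two_eq_zero_or_one a with ha | ha <;>
    rcases Nat.mod_two_eq_zero_or_one b with hb | hb <;> rw [ha, hb] at h2 ⊢ <;> omega

-- &&& with a mask below 2^n only reads the low n bits
theorem pv_and_mod (a m n : Nat) (h : m < 2 ^ n) : a &&& m = (a % 2 ^ n) &&& m := by
  apply Nat.eq_of_testBit_eq
  intro i
  simp only [Nat.testBit_and, Nat.testBit_mod_two_pow]
  by_cases hi : i < n
  · simp [hi]
  · have hm : m.testBit i = false :=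
      Nat.testBit_lt_two_pow (lt_of_lt_of_le h (Nat.pow_le_pow_right (by norm_num) (Nat.le_of_not_lt hi)))
    simp [hm]

-- two's-complement kernel: subtracting the common bits equals AND with the complement
theorem pv_sub_and (n : Nat) : ∀ m z : Nat, m < 2 ^ n → z < 2 ^ n →
    m - (m &&& z) = (2 ^ n - 1 - z) &&& m := by
  induction n with
  | zero =>
    intro m z hm hz
    have hm0 : m = 0 := by omega
    have hz0 : z = 0 := by omega
    subst hm0; subst hz0
    simp
  | succ n ih =>
    intro m z hm hz
    have hpow : (2:Nat) ^ (n + 1) = 2 * 2 ^ n := by ring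
    have h1 := pv_and_rec m z
    have h2 := pv_and_rec (2 ^ (n + 1) - 1 - z) m
    have hw : (2 ^ (n + 1) - 1 - z) / 2 = 2 ^ n - 1 - z / 2 := by omega
    have hw0 : (2 ^ (n + 1) - 1 - z) % 2 = 1 - z % 2 := by omega
    have ihh := ih (m / 2) (z / 2) (by omega) (by omega)
    rw [hw, hw0] at h2
    have hle : m / 2 &&& z / 2 ≤ m / 2 := Nat.and_le_left
    have hle2 : m &&& z ≤ m := Nat.and_le_left
    rcases Nat.mod_two_eq_zero_or_one m with hm2 | hm2 <;>
      rcases Nat.mod_two_eq_zero_or_one z with hz2 | hz2 <;>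
        rw [hm2, hz2] at h1 h2 <;> omega

-- PySem.Int.band with a mask below 2^n only depends on the input mod 2^n
theorem pv_band_emod (x : Int) (m n : Nat) (h : m < 2 ^ n) :
    PySem.Int.band x ↑m = PySem.Int.band (x % ((2 ^ n : Nat) : Int)) ↑m := by
  have hpow : (0:Int) < ((2 ^ n : Nat) : Int) := by exact_mod_cast Nat.two_pow_pos n
  have he0 : 0 ≤ x % ((2 ^ n : Nat) : Int) := Int.emod_nonneg x (ne_of_gt hpow)
  have helt : x % ((2 ^ n : Nat) : Int) < ((2 ^ n : Nat) : Int) := Int.emod_lt_of_pos x hpow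
  by_cases hx : 0 ≤ x
  · rw [PySem.Int.band_of_nonneg hx (Int.natCast_nonneg m),
        PySem.Int.band_of_nonneg he0 (Int.natCast_nonneg m)]
    obtain ⟨a, rfl⟩ := Int.eq_ofNat_of_zero_le hx
    have hcast : ((a : Int) % ((2 ^ n : Nat) : Int)) = ((a % 2 ^ n : Nat) : Int) := by
      exact_mod_cast (Int.natCast_mod a (2 ^ n)).symm
    rw [hcast]
    simp only [Int.toNat_natCast]
    exact_mod_cast pv_and_mod a m n h
  · have hx' : x < 0 := by omega
    have hy : 0 ≤ -x - 1 := by omega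
    set y := (-x - 1).toNat with hy'
    have hyx : x = -(↑y) - 1 := by
      have := Int.toNat_of_nonneg hy
      omega
    have hdm := Nat.div_add_mod y (2 ^ n)
    have hzlt : y % 2 ^ n < 2 ^ n := Nat.mod_lt _ (Nat.two_pow_pos n)
    set t : Nat := 2 ^ n - 1 - y % 2 ^ n with ht'
    have ht : t + y % 2 ^ n + 1 = 2 ^ n := by omega
    have htZ : (t : Int) + ((y % 2 ^ n : Nat) : Int) + 1 = ((2 ^ n : Nat) : Int) := by
      exact_mod_cast ht
    have h1 : (y : Int) = ((2 ^ n : Nat) : Int) * ((y / 2 ^ n : Nat) : Int) + ((y % 2 ^ n : Nat) : Int) := by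
      exact_mod_cast hdm.symm
    have hxt : x = (t : Int) + ((2 ^ n : Nat) : Int) * (-((y / 2 ^ n : Nat) : Int) - 1) := by
      rw [hyx]; linear_combination -h1 - htZ
    have he : x % ((2 ^ n : Nat) : Int) = (t : Int) := by
      rw [hxt, Int.add_mul_emod_self_left]
      exact Int.emod_eq_of_lt (Int.natCast_nonneg t) (by exact_mod_cast (by omega : t < 2 ^ n))
    rw [he, PySem.Int.band_of_nonneg (Int.natCast_nonneg t) (Int.natCast_nonneg m)]
    have hbx : PySem.Int.band x ↑m = ↑(m - (m &&& y)) := by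
      simp only [PySem.Int.band]
      rw [if_neg (by omega), if_pos (Int.natCast_nonneg m)]
      simp [hy']
    rw [hbx]
    simp only [Int.toNat_natCast]
    have h5 : m &&& y = m &&& (y % 2 ^ n) := by
      rw [Nat.and_comm m y, Nat.and_comm m (y % 2 ^ n)]
      exact pv_and_mod y m n h
    rw [h5]
    exact_mod_cast pv_sub_and n m (y % 2 ^ n) h hzlt

theorem pv_band_emod' (m n : Nat) (x : Int) (h : m < 2 ^ n) :
    PySem.Int.band (↑m) x = PySem.Int.band (↑m) (x % ((2 ^ n : Nat) : Int)) := by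
  rw [PySem.Int.band_comm, pv_band_emod x m n h, PySem.Int.band_comm]

theorem pv_ge_of_testBit (x k : Nat) (h : x.testBit k = true) : 2 ^ k ≤ x := by
  by_contra hlt
  have hlt : x < 2 ^ k := by omega
  rw [Nat.testBit_lt_two_pow hlt] at h
  simp at h

theorem pv_lt_of_testBits (x k n : Nat) (hx : x < 2 ^ n)
    (h : ∀ j, k ≤ j → j < n → x.testBit j = false) : x < 2 ^ k := by
  have hxk : x % 2 ^ k = x := by
    apply Nat.eq_of_testBit_eq
    intro i
    simp only [Nat.testBit_mod_two_pow]
    by_cases hik : i < k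
    · simp [hik]
    · by_cases hin : i < n
      · simp [hik, h i (Nat.le_of_not_lt hik) hin]
      · simp [hik, Nat.testBit_lt_two_pow
          (lt_of_lt_of_le hx (Nat.pow_le_pow_right (by norm_num) (Nat.le_of_not_lt hin)))]
  calc x = x % 2 ^ k := hxk.symm
    _ < 2 ^ k := Nat.mod_lt _ (Nat.two_pow_pos _)

theorem pv_bitLength_eq (n k : Nat) (h1 : 2 ^ k ≤ n) (h2 : n < 2 ^ (k + 1)) :
    PySem.Int.bitLength (↑n) = k + 1 := by
  have hne : (↑n : Int) ≠ 0 := by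
    have : 0 < n := lt_of_lt_of_le (Nat.two_pow_pos _) h1
    exact_mod_cast this.ne'
  have hlo := PySem.Int.two_pow_bitLength_le (↑n) hne
  have hhi := PySem.Int.lt_two_pow_bitLength (↑n : Int)
  rw [Int.natAbs_natCast] at hlo hhi
  set L := PySem.Int.bitLength (↑n : Int) with hL
  by_contra hne'
  rcases Nat.lt_or_ge L (k + 1) with hlt | hge
  · have : (2:Nat) ^ L ≤ 2 ^ k := Nat.pow_le_pow_right (by norm_num) (by omega)
    omega
  · have hL2 : k + 2 ≤ L := by omega
    have : (2:Nat) ^ (k + 1) ≤ 2 ^ (L - 1) := Nat.pow_le_pow_right (by norm_num) (by omega)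
    omega

-- the loop only reads its arguments through the band tests it performs
theorem pv_cgLoop_congr (l : List Int) : ∀ (b b' c c' r : Int),
    (∀ i ∈ l, PySem.Int.band (PySem.List.pyGetD validMasks i 0) c
            = PySem.Int.band (PySem.List.pyGetD validMasks i 0) c') →
    (∀ i ∈ l, PySem.Int.band (PySem.List.pyGetD validMasks (11 - i) 0) b
            = PySem.Int.band (PySem.List.pyGetD validMasks (11 - i) 0) b') →
    cgLoop b c l r = cgLoop b' c' l r := by
  induction l with
  | nil => intro b b' c c' r _ _; rfl
  | cons i tl ih =>
    intro b b' c c' r hc hb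
    have hci := hc i (List.mem_cons_self)
    have hbi := hb i (List.mem_cons_self)
    simp only [cgLoop, hci, hbi]
    have hc2 : ∀ j ∈ tl, PySem.Int.band (PySem.List.pyGetD validMasks j 0) c
            = PySem.Int.band (PySem.List.pyGetD validMasks j 0) c' :=
      fun j hj => hc j (List.mem_cons_of_mem _ hj)
    have hb2 : ∀ j ∈ tl, PySem.Int.band (PySem.List.pyGetD validMasks (11 - j) 0) b
            = PySem.Int.band (PySem.List.pyGetD validMasks (11 - j) 0) b' :=
      fun j hj => hb j (List.mem_cons_of_mem _ hj)
    by_cases h1 : PySem.Int.band (PySem.List.pyGetD validMasks i 0) c' ≠ 0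
    · simp [h1]
    · rw [if_neg h1, if_neg h1]
      by_cases h2 : PySem.Int.band (PySem.List.pyGetD validMasks (11 - i) 0) b' ≠ 0
      · rw [if_pos h2, if_pos h2]
        exact ih b b' c c' _ hc2 hb2
      · rw [if_neg h2, if_neg h2]
        exact ih b b' c c' _ hc2 hb2

-- A only depends on baseMask mod 256 and chkMask mod 512
theorem pv_redA (b c : Int) : checkGreater b c = checkGreater (b % 256) (c % 512) := by
  have hc8 : ((2 ^ 8 : Nat) : Int) = 256 := by norm_num
  have hc9 : ((2 ^ 9 : Nat) : Int) = 512 := by norm_num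
  have hb8 : ∀ (m : Nat), m < 2 ^ 8 → ∀ x : Int,
      PySem.Int.band (↑m) x = PySem.Int.band (↑m) (x % 256) := by
    intro m hm x
    have := pv_band_emod' m 8 x hm
    rwa [hc8] at this
  have hb9 : ∀ (m : Nat), m < 2 ^ 9 → ∀ x : Int,
      PySem.Int.band (↑m) x = PySem.Int.band (↑m) (x % 512) := by
    intro m hm x
    have := pv_band_emod' m 9 x hm
    rwa [hc9] at this
  have hR : PySem.List.pyRange 9 2 (-1) = [9, 8, 7, 6, 5, 4, 3] := by decide
  simp only [checkGreater, hR]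
  have h1 : PySem.Int.band (PySem.List.pyGetD validMasks 1 0) b
          = PySem.Int.band (PySem.List.pyGetD validMasks 1 0) (b % 256) := by
    rw [show PySem.List.pyGetD validMasks 1 0 = ((1 : Nat) : Int) from by decide]
    exact hb8 1 (by norm_num) b
  rw [h1]
  apply pv_cgLoop_congr
  · intro i hi
    fin_cases hi
    · rw [show PySem.List.pyGetD validMasks 9 0 = ((256 : Nat) : Int) from by decide]
      exact hb9 256 (by norm_num) c
    · rw [show PySem.List.pyGetD validMasks 8 0 = ((128 : Nat) : Int) from by decide]
      exact hb9 128 (by norm_num) c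
    · rw [show PySem.List.pyGetD validMasks 7 0 = ((64 : Nat) : Int) from by decide]
      exact hb9 64 (by norm_num) c
    · rw [show PySem.List.pyGetD validMasks 6 0 = ((32 : Nat) : Int) from by decide]
      exact hb9 32 (by norm_num) c
    · rw [show PySem.List.pyGetD validMasks 5 0 = ((16 : Nat) : Int) from by decide]
      exact hb9 16 (by norm_num) c
    · rw [show PySem.List.pyGetD validMasks 4 0 = ((8 : Nat) : Int) from by decide]
      exact hb9 8 (by norm_num) c
    · rw [show PySem.List.pyGetD validMasks 3 0 = ((4 : Nat) : Int) from by decide]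
      exact hb9 4 (by norm_num) c
  · intro i hi
    fin_cases hi
    · rw [show PySem.List.pyGetD validMasks (11 - 9) 0 = ((2 : Nat) : Int) from by decide]
      exact hb8 2 (by norm_num) b
    · rw [show PySem.List.pyGetD validMasks (11 - 8) 0 = ((4 : Nat) : Int) from by decide]
      exact hb8 4 (by norm_num) b
    · rw [show PySem.List.pyGetD validMasks (11 - 7) 0 = ((8 : Nat) : Int) from by decide]
      exact hb8 8 (by norm_num) b
    · rw [show PySem.List.pyGetD validMasks (11 - 6) 0 = ((16 : Nat) : Int) from by decide]
      exact hb8 16 (by norm_num) b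
    · rw [show PySem.List.pyGetD validMasks (11 - 5) 0 = ((32 : Nat) : Int) from by decide]
      exact hb8 32 (by norm_num) b
    · rw [show PySem.List.pyGetD validMasks (11 - 4) 0 = ((64 : Nat) : Int) from by decide]
      exact hb8 64 (by norm_num) b
    · rw [show PySem.List.pyGetD validMasks (11 - 3) 0 = ((128 : Nat) : Int) from by decide]
      exact hb8 128 (by norm_num) b

-- B only depends on baseMask mod 256 and chkMask mod 512
theorem pv_redB (b c : Int) : checkGreater_alt b c = checkGreater_alt (b % 256) (c % 512) := by
  have hc8 : ((2 ^ 8 : Nat) : Int) = 256 := by norm_num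
  have hc9 : ((2 ^ 9 : Nat) : Int) = 512 := by norm_num
  simp only [checkGreater_alt]
  have hm : PySem.Int.band c 0x1FC = PySem.Int.band (c % 512) 0x1FC := by
    rw [show (0x1FC : Int) = ((508 : Nat) : Int) from by norm_num]
    have := pv_band_emod c 508 9 (by norm_num)
    rwa [hc9] at this
  rw [hm]
  obtain ⟨k, hk8, hkeq⟩ :
      ∃ k, k ≤ 8 ∧ 10 - max (PySem.Int.bitLength (PySem.Int.band (c % 512) 0x1FC)) 2 = k :=
    ⟨_, by omega, rfl⟩
  rw [hkeq]
  have step : ∀ (m : Nat), m < 2 ^ 8 →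
      PySem.Int.band b (↑m) = PySem.Int.band (b % 256) (↑m) := by
    intro m hmlt
    have := pv_band_emod b m 8 hmlt
    rwa [hc8] at this
  interval_cases k
  · rw [show ((1 : Int) <<< (0 : Nat)) - 1 = ((0 : Nat) : Int) from by decide]
    exact step 0 (by norm_num)
  · rw [show ((1 : Int) <<< (1 : Nat)) - 1 = ((1 : Nat) : Int) from by decide]
    exact step 1 (by norm_num)
  · rw [show ((1 : Int) <<< (2 : Nat)) - 1 = ((3 : Nat) : Int) from by decide]
    exact step 3 (by norm_num)
  · rw [show ((1 : Int) <<< (3 : Nat)) - 1 = ((7 : Nat) : Int) from by decide]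
    exact step 7 (by norm_num)
  · rw [show ((1 : Int) <<< (4 : Nat)) - 1 = ((15 : Nat) : Int) from by decide]
    exact step 15 (by norm_num)
  · rw [show ((1 : Int) <<< (5 : Nat)) - 1 = ((31 : Nat) : Int) from by decide]
    exact step 31 (by norm_num)
  · rw [show ((1 : Int) <<< (6 : Nat)) - 1 = ((63 : Nat) : Int) from by decide]
    exact step 63 (by norm_num)
  · rw [show ((1 : Int) <<< (7 : Nat)) - 1 = ((127 : Nat) : Int) from by decide]
    exact step 127 (by norm_num)
  · rw [show ((1 : Int) <<< (8 : Nat)) - 1 = ((255 : Nat) : Int) from by decide]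
    exact step 255 (by norm_num)

-- the two programs agree on the residues
set_option maxRecDepth 40000 in
theorem pv_main (bn cn : Nat) (hb : bn < 256) (hc : cn < 512) :
    checkGreater ↑bn ↑cn = checkGreater_alt ↑bn ↑cn := by
  have hR : PySem.List.pyRange 9 2 (-1) = [9, 8, 7, 6, 5, 4, 3] := by decide
  have g : ∀ (i : Int) (j : Nat), PySem.List.pyGetD validMasks i 0 = ((2 ^ j : Nat) : Int) →
      PySem.Int.band (PySem.List.pyGetD validMasks i 0) (↑cn)
        = ((2 ^ j * (cn.testBit j).toNat : Nat) : Int) := by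
    intro i j hij
    rw [hij, PySem.Int.band_natCast, Nat.two_pow_and]
  have g9 := g 9 8 (by decide)
  have g8 := g 8 7 (by decide)
  have g7 := g 7 6 (by decide)
  have g6 := g 6 5 (by decide)
  have g5 := g 5 4 (by decide)
  have g4 := g 4 3 (by decide)
  have g3 := g 3 2 (by decide)
  have hband : PySem.Int.band (↑cn) 0x1FC = ((cn &&& 508 : Nat) : Int) := by
    rw [show (0x1FC : Int) = ((508 : Nat) : Int) from by norm_num, PySem.Int.band_natCast]
  have hup9 : cn &&& 508 < 2 ^ 9 := lt_of_le_of_lt Nat.and_le_right (by norm_num)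
  by_cases t8 : cn.testBit 8 = true
  · -- highest chk bit is 8: loop breaks at once, cutoff 1
    have hL : PySem.Int.bitLength (PySem.Int.band (↑cn) 0x1FC) = 9 := by
      rw [hband]
      exact pv_bitLength_eq _ 8
        (pv_ge_of_testBit _ 8 (by rw [Nat.testBit_and, t8]; decide)) hup9
    simp only [checkGreater, checkGreater_alt, hR, cgLoop, g9, hL, t8]
    norm_num
    revert bn
    decide
  have t8f : cn.testBit 8 = false := by simpa using t8
  by_cases t7 : cn.testBit 7 = true
  · -- highest chk bit is 7
    have hL : PySem.Int.bitLength (PySem.Int.band (↑cn) 0x1FC) = 8 := by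
      rw [hband]
      exact pv_bitLength_eq _ 7
        (pv_ge_of_testBit _ 7 (by rw [Nat.testBit_and, t7]; decide))
        (pv_lt_of_testBits _ 8 9 hup9 (by
          intro j hj1 hj2
          interval_cases j
          simp [Nat.testBit_and, t8f]))
    simp only [checkGreater, checkGreater_alt, hR, cgLoop, g9, g8, hL, t8f, t7]
    norm_num
    revert bn
    decide
  have t7f : cn.testBit 7 = false := by simpa using t7
  by_cases t6 : cn.testBit 6 = true
  · -- highest chk bit is 6
    have hL : PySem.Int.bitLength (PySem.Int.band (↑cn) 0x1FC) = 7 := by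
      rw [hband]
      exact pv_bitLength_eq _ 6
        (pv_ge_of_testBit _ 6 (by rw [Nat.testBit_and, t6]; decide))
        (pv_lt_of_testBits _ 7 9 hup9 (by
          intro j hj1 hj2
          interval_cases j <;> simp [Nat.testBit_and, t8f, t7f]))
    simp only [checkGreater, checkGreater_alt, hR, cgLoop, g9, g8, g7, hL, t8f, t7f, t6]
    norm_num
    revert bn
    decide
  have t6f : cn.testBit 6 = false := by simpa using t6
  by_cases t5 : cn.testBit 5 = true
  · -- highest chk bit is 5
    have hL : PySem.Int.bitLength (PySem.Int.band (↑cn) 0x1FC) = 6 := by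
      rw [hband]
      exact pv_bitLength_eq _ 5
        (pv_ge_of_testBit _ 5 (by rw [Nat.testBit_and, t5]; decide))
        (pv_lt_of_testBits _ 6 9 hup9 (by
          intro j hj1 hj2
          interval_cases j <;> simp [Nat.testBit_and, t8f, t7f, t6f]))
    simp only [checkGreater, checkGreater_alt, hR, cgLoop, g9, g8, g7, g6, hL, t8f, t7f, t6f, t5]
    norm_num
    revert bn
    decide
  have t5f : cn.testBit 5 = false := by simpa using t5
  by_cases t4 : cn.testBit 4 = true
  · -- highest chk bit is 4
    have hL : PySem.Int.bitLength (PySem.Int.band (↑cn) 0x1FC) = 5 := by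
      rw [hband]
      exact pv_bitLength_eq _ 4
        (pv_ge_of_testBit _ 4 (by rw [Nat.testBit_and, t4]; decide))
        (pv_lt_of_testBits _ 5 9 hup9 (by
          intro j hj1 hj2
          interval_cases j <;> simp [Nat.testBit_and, t8f, t7f, t6f, t5f]))
    simp only [checkGreater, checkGreater_alt, hR, cgLoop, g9, g8, g7, g6, g5, hL, t8f, t7f, t6f, t5f, t4]
    norm_num
    revert bn
    decide
  have t4f : cn.testBit 4 = false := by simpa using t4
  by_cases t3 : cn.testBit 3 = true
  · -- highest chk bit is 3
    have hL : PySem.Int.bitLength (PySem.Int.band (↑cn) 0x1FC) = 4 := by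
      rw [hband]
      exact pv_bitLength_eq _ 3
        (pv_ge_of_testBit _ 3 (by rw [Nat.testBit_and, t3]; decide))
        (pv_lt_of_testBits _ 4 9 hup9 (by
          intro j hj1 hj2
          interval_cases j <;> simp [Nat.testBit_and, t8f, t7f, t6f, t5f, t4f]))
    simp only [checkGreater, checkGreater_alt, hR, cgLoop, g9, g8, g7, g6, g5, g4, hL, t8f, t7f, t6f, t5f, t4f, t3]
    norm_num
    revert bn
    decide
  have t3f : cn.testBit 3 = false := by simpa using t3
  by_cases t2 : cn.testBit 2 = true
  · -- highest chk bit is 2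
    have hL : PySem.Int.bitLength (PySem.Int.band (↑cn) 0x1FC) = 3 := by
      rw [hband]
      exact pv_bitLength_eq _ 2
        (pv_ge_of_testBit _ 2 (by rw [Nat.testBit_and, t2]; decide))
        (pv_lt_of_testBits _ 3 9 hup9 (by
          intro j hj1 hj2
          interval_cases j <;> simp [Nat.testBit_and, t8f, t7f, t6f, t5f, t4f, t3f]))
    simp only [checkGreater, checkGreater_alt, hR, cgLoop, g9, g8, g7, g6, g5, g4, g3, hL, t8f, t7f, t6f, t5f, t4f, t3f, t2]
    norm_num
    revert bn
    decide
  have t2f : cn.testBit 2 = false := by simpa using t2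
  -- no chk bit in 2..8: the loop runs to the end, cutoff 8
  have hzero : cn &&& 508 = 0 := by
    apply Nat.eq_of_testBit_eq
    intro j
    simp only [Nat.testBit_and, Nat.zero_testBit]
    by_cases hj : j < 9
    · interval_cases j
      · rw [show Nat.testBit 508 0 = false from by decide]; simp
      · rw [show Nat.testBit 508 1 = false from by decide]; simp
      · simp [t2f]
      · simp [t3f]
      · simp [t4f]
      · simp [t5f]
      · simp [t6f]
      · simp [t7f]
      · simp [t8f]
    · have hpj : (512 : Nat) ≤ 2 ^ j := by
        calc (512 : Nat) = 2 ^ 9 := by norm_num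
          _ ≤ 2 ^ j := Nat.pow_le_pow_right (by norm_num) (by omega)
      have hcj : cn.testBit j = false := Nat.testBit_lt_two_pow (lt_of_lt_of_le hc hpj)
      simp [hcj]
  have hL : PySem.Int.bitLength (PySem.Int.band (↑cn) 0x1FC) = 0 := by
    rw [hband, hzero]
    simp
  simp only [checkGreater, checkGreater_alt, hR, cgLoop, g9, g8, g7, g6, g5, g4, g3, hL,
    t8f, t7f, t6f, t5f, t4f, t3f, t2f]
  norm_num
  revert bn
  decide

-- ===== VERDICT (by name: the statement is the Claim_ definition above) =====
theorem checkGreater_spec : Claim_equal_checkGreater := by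
  intro b c _
  unfold Spec_checkGreater
  rw [pv_redA, pv_redB]
  have hb0 : (0:Int) ≤ b % 256 := Int.emod_nonneg b (by norm_num)
  have hb1 : b % 256 < 256 := Int.emod_lt_of_pos b (by norm_num)
  have hc0 : (0:Int) ≤ c % 512 := Int.emod_nonneg c (by norm_num)
  have hc1 : c % 512 < 512 := Int.emod_lt_of_pos c (by norm_num)
  have eb : ((b % 256).toNat : Int) = b % 256 := Int.toNat_of_nonneg hb0
  have ec : ((c % 512).toNat : Int) = c % 512 := Int.toNat_of_nonneg hc0
  rw [← eb, ← ec]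
  exact pv_main _ _ (by omega) (by omega)
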